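-- pv_equiv track=rewrite | github.com/iannil/one-data-studio-lite | apps/backend/app/services/knowledge/rag.py | _paragraph_chunk
-- ===== SOURCE A (Python) =====
-- from typing import Any, Dict, List, Optional, Tuple
--
-- def _paragraph_chunk(
--     text: str, max_chunk_size: int
-- ) -> List[Tuple[str, int, int]]:
--     """Paragraph-based chunking"""
--     paragraphs = text.split("\n\n")
--     chunks = []
--     current_chunk = ""
--     start_pos = 0
--
--     for para in paragraphs:
--         para = para.strip()
--         if not para:
--             continue
--
--         if len(current_chunk) + len(para) > max_chunk_size and current_chunk:
--             chunks.append((current_chunk.strip(), start_pos, start_pos + len(current_chunk)))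
--             start_pos += len(current_chunk)
--             current_chunk = para
--         else:
--             current_chunk += "\n\n" + para if current_chunk else para
--
--     if current_chunk:
--         chunks.append((current_chunk.strip(), start_pos, len(text)))
--
--     return chunks
-- ===== SOURCE B (Python) =====
-- from typing import List, Tuple
--
-- def _paragraph_chunk(
--     text: str, max_chunk_size: int
-- ) -> List[Tuple[str, int, int]]:
--     """Paragraph-based chunking (two-pass: group first, then emit with positions)"""
--     # pass 1: partition the non-empty stripped paragraphs into greedy groups
--     groups: List[List[str]] = []
--     group: List[str] = []
--     glen = 0  # length of "\n\n".join(group)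
--     for para in text.split("\n\n"):
--         para = para.strip()
--         if not para:
--             continue
--         if group and glen + len(para) > max_chunk_size:
--             groups.append(group)
--             group = [para]
--             glen = len(para)
--         else:
--             glen += len(para) + (2 if group else 0)
--             group.append(para)
--     if group:
--         groups.append(group)
--     if not groups:
--         return []
--     # pass 2: emit chunks with running positions
--     chunks: List[Tuple[str, int, int]] = []
--     pos = 0
--     for g in groups:
--         joined = "\n\n".join(g)
--         chunks.append((joined.strip(), pos, pos + len(joined)))
--         pos += len(joined)
--     s, a, _ = chunks[-1]
--     chunks[-1] = (s, a, len(text))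
--     return chunks
-- ===== Notes on version B (the rewrite author's own statement) =====
-- stated objective: alternative
-- what changed: A builds chunks in one loop that accumulates the growing chunk string and emits tuples on the fly; B first partitions the stripped paragraphs into a list of groups with the same greedy rule, then a separate second pass joins each group and assigns running positions, patching the last chunk's end to len(text).
import Mathlib
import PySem

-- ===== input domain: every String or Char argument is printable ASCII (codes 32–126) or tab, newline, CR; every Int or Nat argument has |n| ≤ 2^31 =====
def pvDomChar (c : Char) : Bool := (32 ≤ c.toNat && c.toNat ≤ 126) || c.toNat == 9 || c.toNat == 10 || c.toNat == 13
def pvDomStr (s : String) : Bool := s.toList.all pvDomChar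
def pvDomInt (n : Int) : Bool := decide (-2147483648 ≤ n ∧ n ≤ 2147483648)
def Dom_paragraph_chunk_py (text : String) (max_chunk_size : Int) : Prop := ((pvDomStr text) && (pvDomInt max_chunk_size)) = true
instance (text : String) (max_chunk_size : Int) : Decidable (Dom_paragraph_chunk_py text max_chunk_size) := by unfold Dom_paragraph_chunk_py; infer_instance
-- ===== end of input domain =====

-- B re-decomposes A's single accumulating loop into two passes (greedy grouping of paragraphs,
-- then emission of joined chunks with running positions); same return value, objective: alternative.

-- ===== PORT A =====
-- A's single loop body over (chunks, current_chunk, start_pos); strings kept as List Char (PySem.Chars)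
def pvAStep (m : Int) (st : List (String × Int × Int) × List Char × Int) (para : List Char) :
    List (String × Int × Int) × List Char × Int :=
  let (chunks, current_chunk, start_pos) := st
  let para := PySem.Chars.strip para
  if para = [] then st
  else if ((current_chunk.length : Int) + (para.length : Int) > m ∧ current_chunk ≠ []) then
    (chunks ++ [(String.ofList (PySem.Chars.strip current_chunk), start_pos, start_pos + (current_chunk.length : Int))],
     para, start_pos + (current_chunk.length : Int))
  else
    (chunks, current_chunk ++ (if current_chunk ≠ [] then '\n' :: '\n' :: para else para), start_pos)

def paragraph_chunk_py (text : String) (max_chunk_size : Int) : List (String × Int × Int) :=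
  match (PySem.Chars.splitOn text.toList ['\n', '\n']).foldl (pvAStep max_chunk_size) (([], [], 0)) with
  | (chunks, current_chunk, start_pos) =>
    if current_chunk ≠ [] then
      chunks ++ [(String.ofList (PySem.Chars.strip current_chunk), start_pos, (text.toList.length : Int))]
    else chunks

-- ===== PORT B =====
-- B pass 1 loop body over (groups, group, glen): greedy partition of the stripped paragraphs
def pvBStep (m : Int) (st : List (List (List Char)) × List (List Char) × Int) (para : List Char) :
    List (List (List Char)) × List (List Char) × Int :=
  let (groups, group, glen) := st
  let para := PySem.Chars.strip para
  if para = [] then st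
  else if (group ≠ [] ∧ glen + (para.length : Int) > m) then
    (groups ++ [group], [para], (para.length : Int))
  else
    (groups, group ++ [para], glen + (para.length : Int) + (if group ≠ [] then 2 else 0))

-- B pass 2: emit each group as a chunk with a running position
def pvEmit (groups : List (List (List Char))) (pos : Int) : List (String × Int × Int) :=
  match groups with
  | [] => []
  | g :: gs =>
    let joined := PySem.Chars.join ['\n', '\n'] g
    (String.ofList (PySem.Chars.strip joined), pos, pos + (joined.length : Int)) :: pvEmit gs (pos + (joined.length : Int))

-- chunks[-1] = (s, a, len(text)) of Source B
def pvSetLastEnd (e : Int) : List (String × Int × Int) → List (String × Int × Int)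
  | [] => []
  | [(s, a, _)] => [(s, a, e)]
  | x :: y :: xs => x :: pvSetLastEnd e (y :: xs)

def paragraph_chunk_py_alt (text : String) (max_chunk_size : Int) : List (String × Int × Int) :=
  match (PySem.Chars.splitOn text.toList ['\n', '\n']).foldl (pvBStep max_chunk_size) (([], [], 0)) with
  | (groups, group, _) =>
    let groups := if group ≠ [] then groups ++ [group] else groups
    if groups = [] then []
    else pvSetLastEnd (text.toList.length : Int) (pvEmit groups 0)

-- ===== PRECONDITION & SPEC =====
def Spec_paragraph_chunk_py (text : String) (max_chunk_size : Int) (out : List (String × Int × Int)) : Prop := out = paragraph_chunk_py_alt text max_chunk_size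
instance (text : String) (max_chunk_size : Int) (out : List (String × Int × Int)) : Decidable (Spec_paragraph_chunk_py text max_chunk_size out) := by unfold Spec_paragraph_chunk_py; infer_instance

-- ===== CLAIM (what is proved, stated in full; the proofs are below) =====
def Claim_equal_paragraph_chunk_py : Prop := ∀ (text : String) (max_chunk_size : Int), Dom_paragraph_chunk_py text max_chunk_size → Spec_paragraph_chunk_py text max_chunk_size (paragraph_chunk_py text max_chunk_size)

-- ===== LEMMAS AND PROOFS =====

-- the joined chunk of a group, and the total length of a list of groups
def pvJoin (g : List (List Char)) : List Char := PySem.Chars.join ['\n', '\n'] g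

def pvTot (gs : List (List (List Char))) : Int := (gs.map (fun g => ((pvJoin g).length : Int))).sum

-- B's grouping invariant: every stored paragraph is non-empty, and no group was closed before one opened
def pvInv (st : List (List (List Char)) × List (List Char) × Int) : Prop :=
  (∀ q ∈ st.2.1, q ≠ []) ∧ (st.2.1 = [] → st.1 = []) ∧ st.2.2 = ((pvJoin st.2.1).length : Int)

-- the abstraction from B's pass-1 state to A's loop state
def pvAbs (st : List (List (List Char)) × List (List Char) × Int) :
    List (String × Int × Int) × List Char × Int :=
  (pvEmit st.1 0, pvJoin st.2.1, pvTot st.1)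

lemma pvJoin_append_singleton (g : List (List Char)) (p : List Char) :
    pvJoin (g ++ [p]) = if g = [] then p else pvJoin g ++ '\n' :: '\n' :: p := by
  induction g with
  | nil => simp [pvJoin, PySem.Chars.join_singleton]
  | cons x r ih =>
    cases r with
    | nil => simp [pvJoin, PySem.Chars.join_cons_cons, PySem.Chars.join_singleton]
    | cons y t =>
      simp only [List.cons_append, pvJoin, PySem.Chars.join_cons_cons] at *
      simp [ih]

lemma pvJoin_ne_nil (g : List (List Char)) (hne : g ≠ []) (hq : ∀ q ∈ g, q ≠ []) :
    pvJoin g ≠ [] := by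
  cases g with
  | nil => exact absurd rfl hne
  | cons x r =>
    cases r with
    | nil => simpa [pvJoin, PySem.Chars.join_singleton] using hq x (by simp)
    | cons y t => simp [pvJoin, PySem.Chars.join_cons_cons]

lemma pvEmit_append (gs : List (List (List Char))) (g : List (List Char)) (pos : Int) :
    pvEmit (gs ++ [g]) pos =
      pvEmit gs pos ++ [(String.ofList (PySem.Chars.strip (pvJoin g)), pos + pvTot gs,
                         pos + pvTot gs + ((pvJoin g).length : Int))] := by
  induction gs generalizing pos with
  | nil => simp [pvEmit, pvTot, pvJoin]
  | cons h t ih =>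
    simp only [List.cons_append, pvEmit, pvTot, List.map_cons, List.sum_cons, pvJoin] at *
    rw [ih]
    ring_nf

lemma pvSetLastEnd_append_singleton (e : Int) (xs : List (String × Int × Int)) (s : String) (a b : Int) :
    pvSetLastEnd e (xs ++ [(s, a, b)]) = xs ++ [(s, a, e)] := by
  induction xs with
  | nil => simp [pvSetLastEnd]
  | cons x t ih =>
    cases t with
    | nil => simp [pvSetLastEnd]
    | cons y u => simpa [pvSetLastEnd] using ih

-- one step: A's loop body simulates B's through the abstraction, and the invariant is preserved
lemma pv_step (m : Int) (st : List (List (List Char)) × List (List Char) × Int) (p : List Char)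
    (h : pvInv st) :
    pvAStep m (pvAbs st) p = pvAbs (pvBStep m st p) ∧ pvInv (pvBStep m st p) := by
  obtain ⟨gs, g, glen⟩ := st
  obtain ⟨hq, hclosed, hlen⟩ := h
  dsimp only at hq hclosed hlen
  by_cases hp : PySem.Chars.strip p = []
  · have hA : pvAStep m (pvAbs (gs, g, glen)) p = pvAbs (gs, g, glen) := by
      simp [pvAStep, hp]
    have hB : pvBStep m (gs, g, glen) p = (gs, g, glen) := by
      simp [pvBStep, hp]
    rw [hA, hB]
    exact ⟨rfl, hq, hclosed, hlen⟩
  · have hgj : (pvJoin g ≠ []) ↔ (g ≠ []) := by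
      constructor
      · intro h1 h2; simp [h2, pvJoin, PySem.Chars.join_nil] at h1
      · intro h2; exact pvJoin_ne_nil g h2 hq
    by_cases hcond : (g ≠ [] ∧ glen + ((PySem.Chars.strip p).length : Int) > m)
    · -- close the current group, start a new one
      obtain ⟨hg, hc⟩ := hcond
      have hcond' : g ≠ [] ∧ glen + ((PySem.Chars.strip p).length : Int) > m := ⟨hg, hc⟩
      have hB : pvBStep m (gs, g, glen) p =
          (gs ++ [g], [PySem.Chars.strip p], ((PySem.Chars.strip p).length : Int)) := by
        simp only [pvBStep]
        rw [if_neg hp, if_pos hcond']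
      have hAcond : ((pvJoin g).length : Int) + ((PySem.Chars.strip p).length : Int) > m ∧ pvJoin g ≠ [] :=
        ⟨hlen ▸ hc, hgj.mpr hg⟩
      have hA : pvAStep m (pvAbs (gs, g, glen)) p =
          (pvEmit gs 0 ++ [(String.ofList (PySem.Chars.strip (pvJoin g)), pvTot gs,
             pvTot gs + ((pvJoin g).length : Int))],
           PySem.Chars.strip p, pvTot gs + ((pvJoin g).length : Int)) := by
        simp only [pvAbs, pvAStep]
        rw [if_neg hp, if_pos hAcond]
      rw [hA, hB]
      constructor
      · simp [pvAbs, pvEmit_append, pvTot, pvJoin, PySem.Chars.join_singleton]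
      · refine ⟨?_, by simp, ?_⟩
        · intro q hq'; simp at hq'; simpa [hq'] using hp
        · simp [pvJoin, PySem.Chars.join_singleton]
    · -- extend the current group
      have hB : pvBStep m (gs, g, glen) p =
          (gs, g ++ [PySem.Chars.strip p],
           glen + ((PySem.Chars.strip p).length : Int) + (if g ≠ [] then 2 else 0)) := by
        simp only [pvBStep]
        rw [if_neg hp, if_neg hcond]
      have hAcond : ¬ (((pvJoin g).length : Int) + ((PySem.Chars.strip p).length : Int) > m ∧ pvJoin g ≠ []) := by
        intro h'
        exact hcond ⟨hgj.mp h'.2, by rw [hlen]; exact h'.1⟩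
      have hA : pvAStep m (pvAbs (gs, g, glen)) p =
          (pvEmit gs 0,
           pvJoin g ++ (if pvJoin g ≠ [] then '\n' :: '\n' :: PySem.Chars.strip p else PySem.Chars.strip p),
           pvTot gs) := by
        simp only [pvAbs, pvAStep]
        rw [if_neg hp, if_neg hAcond]
        rfl
      have hjoin : pvJoin (g ++ [PySem.Chars.strip p]) =
          pvJoin g ++ (if pvJoin g ≠ [] then '\n' :: '\n' :: PySem.Chars.strip p else PySem.Chars.strip p) := by
        rw [pvJoin_append_singleton]
        by_cases hg : g = []
        · simp [hg, pvJoin, PySem.Chars.join_nil]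
        · simp [hg, hgj.mpr hg]
      rw [hA, hB]
      refine ⟨by simp [pvAbs, hjoin], ?_, by simp, ?_⟩
      · intro q hq'
        rcases List.mem_append.mp hq' with h1 | h1
        · exact hq q h1
        · simp at h1; simpa [h1] using hp
      · rw [hjoin]
        by_cases hg : g = []
        · simp only [hg, pvJoin, PySem.Chars.join_nil] at hlen ⊢
          simp [hlen]
        · simp [hgj.mpr hg, hg]
          omega

-- the whole pass-1 loop: A's fold is the abstraction of B's fold, invariant preserved
lemma pv_fold (m : Int) (ps : List (List Char)) (st : List (List (List Char)) × List (List Char) × Int)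
    (h : pvInv st) :
    ps.foldl (pvAStep m) (pvAbs st) = pvAbs (ps.foldl (pvBStep m) st) ∧
    pvInv (ps.foldl (pvBStep m) st) := by
  induction ps generalizing st with
  | nil => exact ⟨rfl, h⟩
  | cons p t ih =>
    obtain ⟨h1, h2⟩ := pv_step m st p h
    simpa [List.foldl_cons, h1] using ih (pvBStep m st p) h2

-- ===== VERDICT (by name: the statement is the Claim_ definition above) =====
theorem paragraph_chunk_py_spec : Claim_equal_paragraph_chunk_py := by
  intro text m _
  show paragraph_chunk_py text m = paragraph_chunk_py_alt text m
  unfold paragraph_chunk_py paragraph_chunk_py_alt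
  have h0 : pvInv (([], [], 0) : List (List (List Char)) × List (List Char) × Int) := by
    simp [pvInv, pvJoin, PySem.Chars.join_nil]
  have habs : (pvAbs (([], [], 0) : List (List (List Char)) × List (List Char) × Int)) = ([], [], 0) := by
    simp [pvAbs, pvEmit, pvJoin, PySem.Chars.join_nil, pvTot]
  obtain ⟨h1, h2⟩ := pv_fold m (PySem.Chars.splitOn text.toList ['\n', '\n']) ([], [], 0) h0
  rw [habs] at h1
  simp only [h1]
  rcases hfb : (PySem.Chars.splitOn text.toList ['\n', '\n']).foldl (pvBStep m) ([], [], 0) with ⟨gs, g, glen⟩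
  rw [hfb] at h2
  obtain ⟨hq, hclosed, -⟩ := h2
  by_cases hg : g = []
  · have hgs : gs = [] := hclosed hg
    simp [pvAbs, hg, hgs, pvJoin, PySem.Chars.join_nil, pvEmit]
  · have hj : pvJoin g ≠ [] := pvJoin_ne_nil g hg hq
    simp only [pvAbs]
    rw [if_pos hj, if_pos hg, if_neg (by simp : ¬ (gs ++ [g] = [])), pvEmit_append,
        pvSetLastEnd_append_singleton]
    simp [pvJoin]
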